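-- pv_equiv track=rewrite | github.com/malagasr/supply-alert | app.py | get_salary_estimate
-- ===== SOURCE A (Python) =====
-- def get_salary_estimate(title):
--     """Estimate salary based on job title keywords"""
--     title_lower = title.lower()
--
--     if any(word in title_lower for word in ['director', 'vp', 'vice president', 'head of']):
--         return "$150,000 - $250,000"
--     elif any(word in title_lower for word in ['senior', 'lead', 'principal', 'staff']):
--         return "$120,000 - $180,000"
--     elif any(word in title_lower for word in ['manager', 'scientist', 'architect']):
--         return "$100,000 - $150,000"
--     elif any(word in title_lower for word in ['analyst', 'engineer', 'developer']):
--         return "$75,000 - $120,000"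
--     elif any(word in title_lower for word in ['associate', 'coordinator', 'specialist']):
--         return "$55,000 - $85,000"
--     else:
--         return "$70,000 - $130,000"
-- ===== SOURCE B (Python) =====
-- SALARIES = [
--     "$150,000 - $250,000",
--     "$120,000 - $180,000",
--     "$100,000 - $150,000",
--     "$75,000 - $120,000",
--     "$55,000 - $85,000",
--     "$70,000 - $130,000",  # default tier
-- ]
--
-- KEYWORDS = [
--     ('director', 0), ('vp', 0), ('vice president', 0), ('head of', 0),
--     ('senior', 1), ('lead', 1), ('principal', 1), ('staff', 1),
--     ('manager', 2), ('scientist', 2), ('architect', 2),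
--     ('analyst', 3), ('engineer', 3), ('developer', 3),
--     ('associate', 4), ('coordinator', 4), ('specialist', 4),
-- ]
--
-- def get_salary_estimate(title):
--     """Estimate salary: single text-driven scan keeping the minimum matched tier."""
--     t = title.lower()
--     best = 5
--     for i in range(len(t)):
--         for kw, tier in KEYWORDS:
--             if tier < best and t.startswith(kw, i):
--                 best = tier
--     return SALARIES[best]
-- ===== Notes on version B (the rewrite author's own statement) =====
-- stated objective: alternative
-- what changed: Instead of testing keyword groups in priority order with substring membership, B scans the lowered title once position by position, testing which keywords start at each offset and keeping the minimum (highest-priority) matched tier, then indexes a salary table.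
import Mathlib
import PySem

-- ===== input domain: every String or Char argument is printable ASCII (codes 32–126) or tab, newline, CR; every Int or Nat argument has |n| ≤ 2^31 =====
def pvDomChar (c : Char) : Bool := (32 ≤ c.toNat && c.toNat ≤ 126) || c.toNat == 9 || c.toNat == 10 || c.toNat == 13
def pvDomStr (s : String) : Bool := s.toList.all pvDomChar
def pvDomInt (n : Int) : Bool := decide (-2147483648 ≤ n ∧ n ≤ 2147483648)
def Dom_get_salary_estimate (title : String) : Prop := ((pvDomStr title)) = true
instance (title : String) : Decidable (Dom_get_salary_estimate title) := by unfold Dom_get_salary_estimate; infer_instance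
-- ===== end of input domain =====

-- B replaces A's ordered group/substring cascade by a single position-by-position scan of the
-- lowered title that keeps the minimum matched tier and indexes a salary table (alternative).

-- ===== PORT A =====
def get_salary_estimate (title : String) : String :=
  let title_lower := PySem.Str.lower title
  if (["director", "vp", "vice president", "head of"].any fun word => PySem.Str.isIn word title_lower) then
    "$150,000 - $250,000"
  else if (["senior", "lead", "principal", "staff"].any fun word => PySem.Str.isIn word title_lower) then
    "$120,000 - $180,000"
  else if (["manager", "scientist", "architect"].any fun word => PySem.Str.isIn word title_lower) then
    "$100,000 - $150,000"
  else if (["analyst", "engineer", "developer"].any fun word => PySem.Str.isIn word title_lower) then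
    "$75,000 - $120,000"
  else if (["associate", "coordinator", "specialist"].any fun word => PySem.Str.isIn word title_lower) then
    "$55,000 - $85,000"
  else
    "$70,000 - $130,000"

-- ===== PORT B =====
def pvSalaries : List String :=
  ["$150,000 - $250,000", "$120,000 - $180,000", "$100,000 - $150,000",
   "$75,000 - $120,000", "$55,000 - $85,000", "$70,000 - $130,000"]

def pvKw : List (List Char × Nat) :=
  [("director".toList, 0), ("vp".toList, 0), ("vice president".toList, 0), ("head of".toList, 0),
   ("senior".toList, 1), ("lead".toList, 1), ("principal".toList, 1), ("staff".toList, 1),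
   ("manager".toList, 2), ("scientist".toList, 2), ("architect".toList, 2),
   ("analyst".toList, 3), ("engineer".toList, 3), ("developer".toList, 3),
   ("associate".toList, 4), ("coordinator".toList, 4), ("specialist".toList, 4)]

-- inner loop of Source B: for kw, tier in KEYWORDS: if tier < best and t.startswith(kw, i): best = tier
def pvInner (suf : List Char) (b : Nat) : Nat :=
  pvKw.foldl (fun b p => if p.2 < b ∧ p.1.isPrefixOf suf = true then p.2 else b) b

-- outer loop of Source B: for i in range(len(t)) (t.startswith(kw, i) = kw is a prefix of t.drop i)
def pvScan (t : List Char) : Nat :=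
  (List.range t.length).foldl (fun b i => pvInner (t.drop i) b) 5

def get_salary_estimate_alt (title : String) : String :=
  pvSalaries.getD (pvScan (PySem.Str.lower title).toList) ""

-- ===== PRECONDITION & SPEC =====
def Spec_get_salary_estimate (title : String) (out : String) : Prop := out = get_salary_estimate_alt title
instance (title : String) (out : String) : Decidable (Spec_get_salary_estimate title out) := by unfold Spec_get_salary_estimate; infer_instance

-- ===== CLAIM (what is proved, stated in full; the proofs are below) =====
def Claim_equal_get_salary_estimate : Prop := ∀ (title : String), Dom_get_salary_estimate title → Spec_get_salary_estimate title (get_salary_estimate title)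

-- ===== LEMMAS AND PROOFS =====

-- A's keyword groups, by tier (proof-side bookkeeping only)
def pvGroup : Nat → List String
  | 0 => ["director", "vp", "vice president", "head of"]
  | 1 => ["senior", "lead", "principal", "staff"]
  | 2 => ["manager", "scientist", "architect"]
  | 3 => ["analyst", "engineer", "developer"]
  | 4 => ["associate", "coordinator", "specialist"]
  | _ => []

-- generic facts about the inner fold (over an arbitrary rule list L)
theorem pv_foldl_le (suf : List Char) (L : List (List Char × Nat)) (b : Nat) :
    L.foldl (fun b p => if p.2 < b ∧ p.1.isPrefixOf suf = true then p.2 else b) b ≤ b := by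
  induction L generalizing b with
  | nil => simp
  | cons p L ih =>
    simp only [List.foldl_cons]
    split_ifs with h
    · exact le_trans (ih p.2) (le_of_lt h.1)
    · exact ih b

theorem pv_foldl_cases (suf : List Char) (L : List (List Char × Nat)) (b : Nat) :
    L.foldl (fun b p => if p.2 < b ∧ p.1.isPrefixOf suf = true then p.2 else b) b = b ∨
      ∃ p ∈ L, L.foldl (fun b p => if p.2 < b ∧ p.1.isPrefixOf suf = true then p.2 else b) b = p.2 ∧
        p.1.isPrefixOf suf = true := by
  induction L generalizing b with
  | nil => simp
  | cons p L ih =>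
    simp only [List.foldl_cons]
    split_ifs with h
    · rcases ih p.2 with h' | ⟨q, hq, h', hpre⟩
      · exact Or.inr ⟨p, List.mem_cons_self .., h', h.2⟩
      · exact Or.inr ⟨q, List.mem_cons_of_mem _ hq, h', hpre⟩
    · rcases ih b with h' | ⟨q, hq, h', hpre⟩
      · exact Or.inl h'
      · exact Or.inr ⟨q, List.mem_cons_of_mem _ hq, h', hpre⟩

theorem pv_foldl_min (suf : List Char) (L : List (List Char × Nat)) (b : Nat)
    (p : List Char × Nat) (hp : p ∈ L) (hpre : p.1.isPrefixOf suf = true) :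
    L.foldl (fun b p => if p.2 < b ∧ p.1.isPrefixOf suf = true then p.2 else b) b ≤ p.2 := by
  induction L generalizing b with
  | nil => simp at hp
  | cons q L ih =>
    simp only [List.foldl_cons]
    rcases List.mem_cons.mp hp with rfl | hp'
    · split_ifs with h
      · exact pv_foldl_le suf L p.2
      · have hnb : ¬ p.2 < b := fun hlt => h ⟨hlt, hpre⟩
        exact le_trans (pv_foldl_le suf L b) (Nat.le_of_not_lt hnb)
    · split_ifs with h
      · exact ih q.2 hp'
      · exact ih b hp'

-- the pvInner instances
theorem pv_inner_le (suf : List Char) (b : Nat) : pvInner suf b ≤ b :=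
  pv_foldl_le suf pvKw b

theorem pv_inner_cases (suf : List Char) (b : Nat) :
    pvInner suf b = b ∨ ∃ p ∈ pvKw, pvInner suf b = p.2 ∧ p.1.isPrefixOf suf = true :=
  pv_foldl_cases suf pvKw b

theorem pv_inner_min (suf : List Char) (b : Nat) (p : List Char × Nat)
    (hp : p ∈ pvKw) (hpre : p.1.isPrefixOf suf = true) : pvInner suf b ≤ p.2 :=
  pv_foldl_min suf pvKw b p hp hpre

-- outer-fold versions, over an arbitrary index list
theorem pv_outer_le (t : List Char) (js : List Nat) (b : Nat) :
    js.foldl (fun b i => pvInner (t.drop i) b) b ≤ b := by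
  induction js generalizing b with
  | nil => simp
  | cons j js ih =>
    simp only [List.foldl_cons]
    exact le_trans (ih (pvInner (t.drop j) b)) (pv_inner_le (t.drop j) b)

theorem pv_outer_cases (t : List Char) (js : List Nat) (b : Nat) :
    js.foldl (fun b i => pvInner (t.drop i) b) b = b ∨
      ∃ p ∈ pvKw, js.foldl (fun b i => pvInner (t.drop i) b) b = p.2 ∧
        PySem.Chars.isIn p.1 t = true := by
  induction js generalizing b with
  | nil => simp
  | cons j js ih =>
    simp only [List.foldl_cons]
    rcases ih (pvInner (t.drop j) b) with h | h
    · rw [h]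
      rcases pv_inner_cases (t.drop j) b with h' | ⟨p, hp, h', hpre⟩
      · exact Or.inl h'
      · refine Or.inr ⟨p, hp, h', ?_⟩
        have hinf : p.1 <:+: t :=
          ((List.isPrefixOf_iff_prefix.mp hpre).isInfix).trans (List.drop_suffix j t).isInfix
        exact (PySem.Chars.isIn_iff_infix _ _).mpr hinf
    · exact Or.inr h

theorem pv_outer_min (t : List Char) (js : List Nat) (b : Nat) (j : Nat) (hj : j ∈ js)
    (p : List Char × Nat) (hp : p ∈ pvKw) (hpre : p.1.isPrefixOf (t.drop j) = true) :
    js.foldl (fun b i => pvInner (t.drop i) b) b ≤ p.2 := by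
  induction js generalizing b with
  | nil => simp at hj
  | cons j' js ih =>
    simp only [List.foldl_cons]
    rcases List.mem_cons.mp hj with rfl | hj'
    · exact le_trans (pv_outer_le _ _ _) (pv_inner_min _ _ _ hp hpre)
    · exact ih _ hj'

-- a keyword that occurs in t occurs at a position inside range (table keywords are nonempty)
theorem pv_isIn_to_pos (t : List Char) (p : List Char × Nat) (hp : p ∈ pvKw)
    (h : PySem.Chars.isIn p.1 t = true) :
    ∃ j ∈ List.range t.length, p.1.isPrefixOf (t.drop j) = true := by
  have hne : p.1 ≠ [] := by fin_cases hp <;> simp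
  obtain ⟨j, hj⟩ := (PySem.Chars.exists_prefix_drop_iff_isIn p.1 t).mpr h
  refine ⟨j, ?_, List.isPrefixOf_iff_prefix.mpr hj⟩
  rw [List.mem_range]
  by_contra hlen
  rw [List.drop_eq_nil_of_le (Nat.le_of_not_lt hlen)] at hj
  exact hne (List.prefix_nil.mp hj)

theorem pv_scan_min (t : List Char) (p : List Char × Nat) (hp : p ∈ pvKw)
    (h : PySem.Chars.isIn p.1 t = true) : pvScan t ≤ p.2 := by
  obtain ⟨j, hj, hpre⟩ := pv_isIn_to_pos t p hp h
  exact pv_outer_min t _ 5 j hj p hp hpre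

theorem pv_scan_cases (t : List Char) :
    pvScan t = 5 ∨ ∃ p ∈ pvKw, pvScan t = p.2 ∧ PySem.Chars.isIn p.1 t = true :=
  pv_outer_cases t _ 5

-- a matched table keyword makes its tier's group condition true
theorem pv_match_group (t : List Char) (p : List Char × Nat) (hp : p ∈ pvKw)
    (hin : PySem.Chars.isIn p.1 t = true) :
    ((pvGroup p.2).any fun w => PySem.Chars.isIn w.toList t) = true := by
  fin_cases hp <;> simp_all [pvGroup]

-- a true group condition bounds the scan by its tier
theorem pv_group_min (t : List Char) (k : Nat) (hk : k ≤ 4)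
    (hc : ((pvGroup k).any fun w => PySem.Chars.isIn w.toList t) = true) : pvScan t ≤ k := by
  simp only [List.any_eq_true] at hc
  obtain ⟨w, hw, h⟩ := hc
  have hex : ∃ p ∈ pvKw, p.2 = k ∧ p.1 = w.toList := by
    interval_cases k <;> fin_cases hw <;> decide
  obtain ⟨p, hp, hk2, hw2⟩ := hex
  rw [← hk2]
  exact pv_scan_min t p hp (hw2 ▸ h)

-- ===== VERDICT (by name: the statement is the Claim_ definition above) =====
theorem get_salary_estimate_spec : Claim_equal_get_salary_estimate := by
  intro title _
  unfold Spec_get_salary_estimate get_salary_estimate get_salary_estimate_alt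
  simp only [PySem.Str.isIn_eq, PySem.Str.toList_lower]
  set t := PySem.Chars.lower title.toList with ht
  have hne : ∀ k, k ≤ 4 → ¬ ((pvGroup k).any fun w => PySem.Chars.isIn w.toList t) = true →
      pvScan t ≠ k := by
    intro k hk hc h
    rcases pv_scan_cases t with h5 | ⟨p, hp, hv, hin⟩
    · omega
    · have hpk : p.2 = k := by rw [← hv, h]
      exact hc (hpk ▸ pv_match_group t p hp hin)
  by_cases c0 : ((pvGroup 0).any fun w => PySem.Chars.isIn w.toList t) = true
  · have h0 : pvScan t = 0 := Nat.le_zero.mp (pv_group_min t 0 (by norm_num) c0)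
    simp only [pvGroup] at c0
    simp [c0, h0, pvSalaries]
  · by_cases c1 : ((pvGroup 1).any fun w => PySem.Chars.isIn w.toList t) = true
    · have hle : pvScan t ≤ 1 := pv_group_min t 1 (by norm_num) c1
      have h1 : pvScan t = 1 := by have := hne 0 (by norm_num) c0; omega
      simp only [pvGroup] at c0 c1
      simp [c0, c1, h1, pvSalaries]
    · by_cases c2 : ((pvGroup 2).any fun w => PySem.Chars.isIn w.toList t) = true
      · have hle : pvScan t ≤ 2 := pv_group_min t 2 (by norm_num) c2
        have h2 : pvScan t = 2 := by
          have := hne 0 (by norm_num) c0; have := hne 1 (by norm_num) c1; omega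
        simp only [pvGroup] at c0 c1 c2
        simp [c0, c1, c2, h2, pvSalaries]
      · by_cases c3 : ((pvGroup 3).any fun w => PySem.Chars.isIn w.toList t) = true
        · have hle : pvScan t ≤ 3 := pv_group_min t 3 (by norm_num) c3
          have h3 : pvScan t = 3 := by
            have := hne 0 (by norm_num) c0; have := hne 1 (by norm_num) c1
            have := hne 2 (by norm_num) c2; omega
          simp only [pvGroup] at c0 c1 c2 c3
          simp [c0, c1, c2, c3, h3, pvSalaries]
        · by_cases c4 : ((pvGroup 4).any fun w => PySem.Chars.isIn w.toList t) = true
          · have hle : pvScan t ≤ 4 := pv_group_min t 4 (by norm_num) c4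
            have h4 : pvScan t = 4 := by
              have := hne 0 (by norm_num) c0; have := hne 1 (by norm_num) c1
              have := hne 2 (by norm_num) c2; have := hne 3 (by norm_num) c3; omega
            simp only [pvGroup] at c0 c1 c2 c3 c4
            simp [c0, c1, c2, c3, c4, h4, pvSalaries]
          · have h5 : pvScan t = 5 := by
              have hb := pv_outer_le t (List.range t.length) 5
              have : pvScan t ≤ 5 := hb
              have := hne 0 (by norm_num) c0; have := hne 1 (by norm_num) c1
              have := hne 2 (by norm_num) c2; have := hne 3 (by norm_num) c3
              have := hne 4 (by norm_num) c4; omega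
            simp only [pvGroup] at c0 c1 c2 c3 c4
            simp [c0, c1, c2, c3, c4, h5, pvSalaries]
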